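-- pv_equiv track=rewrite | github.com/anterra/google-foobar | challenge 2.5 dict only.py | solution
-- ===== SOURCE A (Python) =====
-- def solution(x, y):
--     """"""
--     # defining size of triangle based on largest input value
--     if x > y:
--         n = 2 * x
--     else:
--         n = 2 * y
--
--     # generating Floyd triangle
--     num = 1
--     rows = {}
--     for row in range(1, n + 1):
--         cols = {}
--         for col in range(1, row + 1):
--             cols[col] = str(num)
--             num += 1
--         rows[row] = cols
--
--     # generating prison triangle
--     id_list = {}
--     for x_id in range(1, n + 1):
--         y_id = 1
--         y_list = {}
--         for row in range(1, n + 1):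
--             if len(rows[row]) >= x_id:
--                 y_list[y_id] = rows[row][x_id]
--                 y_id += 1
--             else:
--                 pass
--         id_list[x_id] = y_list
--
--     return str(id_list[x][y])
-- ===== SOURCE B (Python) =====
-- def solution(x, y):
--     # closed form: position (x, y) in the diagonal-numbered triangle
--     d = x + y - 2
--     return str(d * (d + 1) // 2 + x)
-- ===== Notes on version B (the rewrite author's own statement) =====
-- stated objective: faster
-- what changed: replaces the construction of the full Floyd triangle and prison-triangle dictionaries (two nested loops up to 2*max(x,y)) by the closed-form diagonal formula (x+y-2)(x+y-1)/2 + x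
import Mathlib
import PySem

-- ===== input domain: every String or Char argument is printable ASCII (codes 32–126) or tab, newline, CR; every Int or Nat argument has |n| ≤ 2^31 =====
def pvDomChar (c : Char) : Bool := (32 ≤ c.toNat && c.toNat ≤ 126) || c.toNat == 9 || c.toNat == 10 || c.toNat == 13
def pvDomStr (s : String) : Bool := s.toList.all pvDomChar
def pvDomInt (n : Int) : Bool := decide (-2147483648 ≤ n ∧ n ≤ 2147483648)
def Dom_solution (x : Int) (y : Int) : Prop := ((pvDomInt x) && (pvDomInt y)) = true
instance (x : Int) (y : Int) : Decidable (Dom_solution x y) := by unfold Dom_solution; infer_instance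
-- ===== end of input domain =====

-- B replaces A's quadratic construction of the Floyd/prison triangle dictionaries by the
-- closed-form diagonal formula (x+y-2)(x+y-1)//2 + x (objective: faster).


-- ===== PORT A =====
-- literal port of A, step for step: build the Floyd triangle 'rows' (dict row -> dict col -> str),
-- then the prison triangle 'id_list', then look up id_list[x][y].  The final lookups use getD:
-- inside Pre_solution the keys are always present (Python raises KeyError exactly outside it).

-- first loop of A: 'for row in range(1, n+1): for col in range(1, row+1): cols[col]=str(num); num+=1'
def buildRows (n : Int) : PySem.Dict Int (PySem.Dict Int String) :=
  ((PySem.List.pyRange 1 (n + 1) 1).foldl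
    (fun (st : Int × PySem.Dict Int (PySem.Dict Int String)) row =>
      let inner :=
        (PySem.List.pyRange 1 (row + 1) 1).foldl
          (fun (st2 : Int × PySem.Dict Int String) col =>
            (st2.1 + 1, st2.2.insert col (PySem.Int.toStr st2.1)))
          (st.1, PySem.Dict.empty)
      (inner.1, st.2.insert row inner.2))
    (1, PySem.Dict.empty)).2

-- inner second loop of A: 'y_id = 1; for row in range(1, n+1): if len(rows[row]) >= x_id: ...'
def buildYList (rows : PySem.Dict Int (PySem.Dict Int String)) (n : Int) (x_id : Int) :
    PySem.Dict Int String :=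
  ((PySem.List.pyRange 1 (n + 1) 1).foldl
    (fun (st2 : Int × PySem.Dict Int String) row =>
      if x_id ≤ ((rows.getD row PySem.Dict.empty).size : Int) then
        (st2.1 + 1, st2.2.insert st2.1 ((rows.getD row PySem.Dict.empty).getD x_id ""))
      else st2)
    (1, PySem.Dict.empty)).2

-- outer second loop of A: 'for x_id in range(1, n+1): id_list[x_id] = y_list'
def buildIdList (rows : PySem.Dict Int (PySem.Dict Int String)) (n : Int) :
    PySem.Dict Int (PySem.Dict Int String) :=
  (PySem.List.pyRange 1 (n + 1) 1).foldl
    (fun acc x_id => acc.insert x_id (buildYList rows n x_id))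
    PySem.Dict.empty

def solution (x : Int) (y : Int) : String :=
  let n : Int := if x > y then 2 * x else 2 * y
  -- str(id_list[x][y]): the stored value is already a string, str() is the identity
  ((buildIdList (buildRows n) n).getD x PySem.Dict.empty).getD y ""

-- ===== PORT B =====
def solution_alt (x : Int) (y : Int) : String :=
  let d := x + y - 2
  PySem.Int.toStr (PySem.Int.floordiv (d * (d + 1)) 2 + x)

-- ===== PRECONDITION & SPEC =====
-- Pre_solution: exactly the inputs on which A returns (x ≤ 0 or y ≤ 0 makes A raise KeyError)
def Pre_solution (x : Int) (y : Int) : Prop := 1 ≤ x ∧ 1 ≤ y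
instance (x : Int) (y : Int) : Decidable (Pre_solution x y) := by unfold Pre_solution; infer_instance
def pvWitness_solution : Int × Int := (3, 2)

def Spec_solution (x : Int) (y : Int) (out : String) : Prop := out = solution_alt x y
instance (x : Int) (y : Int) (out : String) : Decidable (Spec_solution x y out) := by unfold Spec_solution; infer_instance

-- ===== CLAIM (what is proved, stated in full; the proofs are below) =====
def Claim_equal_solution : Prop := ∀ (x : Int) (y : Int), Dom_solution x y → Pre_solution x y → Spec_solution x y (solution x y)

-- ===== LEMMAS AND PROOFS =====

-- triangular numbers: triN m = 1 + 2 + … + m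
def triN : Nat → Nat
  | 0 => 0
  | m + 1 => triN m + (m + 1)

theorem two_triN (k : Nat) : 2 * triN k = k * (k + 1) := by
  induction k with
  | zero => rfl
  | succ k ih => simp only [triN]; ring_nf; ring_nf at ih; omega

-- the cols dict A builds for one Floyd row of length m, starting at number num0
def colsD (num0 : Int) (m : Nat) : PySem.Dict Int String :=
  PySem.Dict.mk ((List.range m).map (fun (i : Nat) => ((1 + i : Int), PySem.Int.toStr (num0 + i))))

def numStart (j : Nat) : Int := 1 + (triN j : Int)

-- A's rows dict after the whole first loop (m rows)
def rowsD (m : Nat) : PySem.Dict Int (PySem.Dict Int String) :=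
  PySem.Dict.mk ((List.range m).map (fun (j : Nat) => ((1 + j : Int), colsD (numStart j) (j + 1))))

-- generic lookup in a dict whose items are indexed by 1..m
theorem getD_mk_range {ν : Type} (m : Nat) (g : Nat → ν) (c : Int) (d0 : ν)
    (h1 : 1 ≤ c) (h2 : c ≤ (m : Int)) :
    (PySem.Dict.mk ((List.range m).map (fun (i : Nat) => ((1 + i : Int), g i)))).getD c d0
      = g (c.toNat - 1) := by
  apply PySem.Dict.getD_of_mem_items
  · rw [List.mem_map]
    refine ⟨c.toNat - 1, by rw [List.mem_range]; omega, ?_⟩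
    congr 1
    omega
  · simp only [PySem.Dict.keys_mk, List.map_map]
    have he : ((fun p : Int × ν => p.1) ∘ fun i : Nat => ((1 + i : Int), g i))
        = fun i : Nat => (1 + i : Int) := rfl
    rw [he]
    exact List.nodup_range.map (fun a b h => by omega)

theorem size_mk_range {ν : Type} (m : Nat) (g : Nat → ν) :
    (PySem.Dict.mk ((List.range m).map (fun (i : Nat) => ((1 + i : Int), g i)))).size = m := by
  simp [PySem.Dict.size]

theorem not_contains_mk_range {ν : Type} (m : Nat) (g : Nat → ν) (c : Int)
    (hc : (m : Int) < c) :
    (PySem.Dict.mk ((List.range m).map (fun (i : Nat) => ((1 + i : Int), g i)))).contains c = false := by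
  rw [PySem.Dict.contains_mk]
  simp only [List.any_map, List.any_eq_false, Function.comp_apply, List.mem_range]
  intro i hi
  simp only [beq_iff_eq]
  omega

-- A's inner Floyd loop over one row of length m, starting from number num0
theorem inner_loop (m : Nat) (num0 : Int) :
    (PySem.List.pyRange 1 ((m : Int) + 1) 1).foldl
      (fun (st2 : Int × PySem.Dict Int String) col =>
        (st2.1 + 1, st2.2.insert col (PySem.Int.toStr st2.1)))
      (num0, PySem.Dict.empty)
    = (num0 + m, colsD num0 m) := by
  induction m with
  | zero =>
    rw [PySem.List.pyRange_one_eq_nil (by omega)]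
    simp [colsD]
    rfl
  | succ m ih =>
    push_cast
    rw [PySem.List.pyRange_one_succ_right (by omega : (1:Int) ≤ (m : Int) + 1),
        List.foldl_append, ih]
    simp only [List.foldl_cons, List.foldl_nil, Prod.mk.injEq]
    constructor
    · ring
    · apply PySem.Dict.ext
      simp only [colsD]
      rw [PySem.Dict.items_insert_of_not_contains _ _
            (not_contains_mk_range m _ ((m : Int) + 1) (by omega))]
      simp only [List.range_succ, List.map_append, List.map_cons, List.map_nil]
      congr 3
      omega

-- A's whole first loop: after m rows, num = numStart m and rows = rowsD m
theorem rows_loop (m : Nat) :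
    (PySem.List.pyRange 1 ((m : Int) + 1) 1).foldl
      (fun (st : Int × PySem.Dict Int (PySem.Dict Int String)) row =>
        let inner :=
          (PySem.List.pyRange 1 (row + 1) 1).foldl
            (fun (st2 : Int × PySem.Dict Int String) col =>
              (st2.1 + 1, st2.2.insert col (PySem.Int.toStr st2.1)))
            (st.1, PySem.Dict.empty)
        (inner.1, st.2.insert row inner.2))
      (1, PySem.Dict.empty)
    = (numStart m, rowsD m) := by
  induction m with
  | zero =>
    rw [PySem.List.pyRange_one_eq_nil (by omega)]
    simp [numStart, triN, rowsD]
    rfl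
  | succ m ih =>
    push_cast
    rw [PySem.List.pyRange_one_succ_right (by omega : (1:Int) ≤ (m : Int) + 1),
        List.foldl_append, ih]
    simp only [List.foldl_cons, List.foldl_nil]
    have hin := inner_loop (m + 1) (numStart m)
    push_cast at hin
    rw [hin]
    simp only [Prod.mk.injEq]
    constructor
    · simp only [numStart, triN]; push_cast; ring
    · apply PySem.Dict.ext
      simp only [rowsD]
      rw [PySem.Dict.items_insert_of_not_contains _ _
            (not_contains_mk_range m _ ((m : Int) + 1) (by omega))]
      simp only [List.range_succ, List.map_append, List.map_cons, List.map_nil]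
      congr 3
      omega

theorem buildRows_eq (m : Nat) : buildRows (m : Int) = rowsD m := by
  unfold buildRows
  rw [rows_loop m]

-- lookup of one row in rowsD
theorem getD_rowsD (n' : Nat) (r : Int) (h1 : 1 ≤ r) (h2 : r ≤ (n' : Int)) :
    (rowsD n').getD r PySem.Dict.empty = colsD (numStart (r.toNat - 1)) r.toNat := by
  rw [rowsD, getD_mk_range n' _ r _ h1 h2]
  congr 1
  omega

theorem size_colsD (num0 : Int) (m : Nat) : (colsD num0 m).size = m := size_mk_range m _

theorem getD_colsD (num0 c : Int) (m : Nat) (h1 : 1 ≤ c) (h2 : c ≤ (m : Int)) :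
    (colsD num0 m).getD c "" = PySem.Int.toStr (num0 + c - 1) := by
  rw [colsD, getD_mk_range m _ c _ h1 h2]
  congr 1
  omega

-- the unconditional y_list loop shape
theorem ylist_loop (m : Nat) (x0 : Int) (f : Int → String) :
    (PySem.List.pyRange x0 (x0 + (m : Int)) 1).foldl
      (fun (st2 : Int × PySem.Dict Int String) row =>
        (st2.1 + 1, st2.2.insert st2.1 (f row)))
      (1, PySem.Dict.empty)
    = (1 + (m : Int), PySem.Dict.mk ((List.range m).map (fun (i : Nat) => ((1 + i : Int), f (x0 + i))))) := by
  induction m with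
  | zero =>
    rw [show x0 + ((0:Nat):Int) = x0 by push_cast; ring, PySem.List.pyRange_one_eq_nil le_rfl]
    simp
    rfl
  | succ m ih =>
    rw [show x0 + ((m+1:Nat):Int) = (x0 + (m:Int)) + 1 by push_cast; ring,
        PySem.List.pyRange_one_succ_right (by omega : x0 ≤ x0 + (m : Int)),
        List.foldl_append, ih]
    simp only [List.foldl_cons, List.foldl_nil, Prod.mk.injEq]
    constructor
    · push_cast; ring
    · apply PySem.Dict.ext
      rw [PySem.Dict.items_insert_of_not_contains _ _
            (not_contains_mk_range m _ ((1:Int) + m) (by omega))]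
      simp only [List.range_succ, List.map_append, List.map_cons, List.map_nil]

-- generic lookup in a fold of inserts over distinct keys
theorem getD_foldl_insert_distinct {ν : Type} (l : List Int) (V : Int → ν) (x : Int) (d0 : ν)
    (hnd : l.Nodup) (hm : x ∈ l) :
    (l.foldl (fun acc k => acc.insert k (V k)) (PySem.Dict.empty : PySem.Dict Int ν)).getD x d0
      = V x := by
  have hfresh := PySem.Dict.items_foldl_insert_fresh l (fun a => a) V PySem.Dict.empty
      (by intro a _; exact PySem.Dict.contains_empty a) (by simpa using hnd)
  apply PySem.Dict.getD_of_mem_items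
  · rw [hfresh]
    refine List.mem_append_right _ (List.mem_map.mpr ⟨x, hm, rfl⟩)
  · rw [PySem.Dict.keys, hfresh]
    have hid : ((fun x : Int × ν => x.1) ∘ fun a : Int => (a, V a)) = id := rfl
    simpa [hid] using hnd

-- what buildYList computes for a valid x against the real rows dict
theorem buildYList_eq (nN : Nat) (x : Int) (hx : 1 ≤ x) (hxn : x ≤ (nN : Int)) :
    buildYList (rowsD nN) (nN : Int) x
      = PySem.Dict.mk (((List.range ((nN : Int) + 1 - x).toNat).map
          (fun (i : Nat) => ((1 + i : Int),
            PySem.Int.toStr (numStart ((x + (i : Int)).toNat - 1) + x - 1))))) := by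
  set m' : Nat := ((nN : Int) + 1 - x).toNat with hm'
  unfold buildYList
  rw [PySem.List.pyRange_one_append 1 x ((nN : Int) + 1) hx (by omega), List.foldl_append]
  -- the rows before row = x are all too short: the loop body is the identity there
  have h1 : (PySem.List.pyRange 1 x 1).foldl
      (fun (st2 : Int × PySem.Dict Int String) row =>
        if x ≤ (((rowsD nN).getD row PySem.Dict.empty).size : Int) then
          (st2.1 + 1, st2.2.insert st2.1 (((rowsD nN).getD row PySem.Dict.empty).getD x ""))
        else st2)
      (1, PySem.Dict.empty) = (1, PySem.Dict.empty) := by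
    rw [PySem.List.foldl_congr_mem (PySem.List.pyRange 1 x 1) _
          (fun (st2 : Int × PySem.Dict Int String) (_ : Int) => st2) _
          (by
            intro acc row hrow
            rw [PySem.List.mem_pyRange_one] at hrow
            rw [getD_rowsD nN row hrow.1 (by omega), size_colsD, if_neg (by omega)]),
        PySem.List.foldl_ignore]
  rw [h1]
  -- from row = x on, every row is long enough: the loop inserts unconditionally
  have h2 : (PySem.List.pyRange x ((nN : Int) + 1) 1).foldl
      (fun (st2 : Int × PySem.Dict Int String) row =>
        if x ≤ (((rowsD nN).getD row PySem.Dict.empty).size : Int) then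
          (st2.1 + 1, st2.2.insert st2.1 (((rowsD nN).getD row PySem.Dict.empty).getD x ""))
        else st2)
      (1, PySem.Dict.empty)
      = (1 + (m' : Int), PySem.Dict.mk ((List.range m').map
          (fun (i : Nat) => ((1 + i : Int),
            PySem.Int.toStr (numStart ((x + (i : Int)).toNat - 1) + x - 1))))) := by
    rw [show (nN : Int) + 1 = x + (m' : Int) by omega]
    rw [PySem.List.foldl_congr_mem (PySem.List.pyRange x (x + (m' : Int)) 1) _
          (fun (st2 : Int × PySem.Dict Int String) (row : Int) =>
            (st2.1 + 1, st2.2.insert st2.1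
              (PySem.Int.toStr (numStart (row.toNat - 1) + x - 1)))) _
          (by
            intro acc row hrow
            rw [PySem.List.mem_pyRange_one] at hrow
            have hr1 : 1 ≤ row := by omega
            have hr2 : row ≤ (nN : Int) := by omega
            rw [getD_rowsD nN row hr1 hr2, size_colsD, if_pos (by omega),
                getD_colsD _ x row.toNat hx (by omega)])]
    rw [ylist_loop m' x (fun row => PySem.Int.toStr (numStart (row.toNat - 1) + x - 1))]
  rw [h2]

-- closed form of A
theorem solution_closed (x y : Int) (hx : 1 ≤ x) (hy : 1 ≤ y) :
    solution x y = PySem.Int.toStr ((triN (x + y - 2).toNat : Int) + x) := by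
  obtain ⟨nN, hnN, hxn, hyn, hsum⟩ :
      ∃ nN : Nat, (if x > y then 2 * x else 2 * y) = (nN : Int) ∧
        x ≤ (nN : Int) ∧ y ≤ (nN : Int) ∧ x + y ≤ (nN : Int) + 1 := by
    refine ⟨(if x > y then 2 * x else 2 * y).toNat, ?_⟩
    split_ifs <;> omega
  show ((buildIdList (buildRows (if x > y then 2 * x else 2 * y))
          (if x > y then 2 * x else 2 * y)).getD x PySem.Dict.empty).getD y ""
      = PySem.Int.toStr ((triN (x + y - 2).toNat : Int) + x)
  rw [hnN, buildRows_eq nN]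
  unfold buildIdList
  rw [getD_foldl_insert_distinct _ _ x _ (PySem.List.nodup_pyRange_one _ _)
        (PySem.List.mem_pyRange_one.mpr ⟨hx, by omega⟩)]
  rw [buildYList_eq nN x hx hxn]
  rw [getD_mk_range _ _ y _ hy (by omega)]
  have hcast : (x + ((y.toNat - 1 : Nat) : Int)) = x + y - 1 := by omega
  rw [hcast]
  simp only [numStart]
  congr 1
  have h2 : (x + y - 1).toNat - 1 = (x + y - 2).toNat := by omega
  rw [h2]
  ring

-- closed form of B
theorem alt_closed (x y : Int) (hx : 1 ≤ x) (hy : 1 ≤ y) :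
    solution_alt x y = PySem.Int.toStr ((triN (x + y - 2).toNat : Int) + x) := by
  show PySem.Int.toStr
      (PySem.Int.floordiv ((x + y - 2) * ((x + y - 2) + 1)) 2 + x) = _
  congr 1
  set k : Nat := (x + y - 2).toNat with hk
  have hxk : x + y - 2 = (k : Int) := by omega
  have h2 : ((2 : Int)) * (triN k : Int) = (k : Int) * ((k : Int) + 1) := by
    exact_mod_cast congrArg (Nat.cast : Nat → Int) (two_triN k)
  rw [hxk]
  rw [PySem.Int.floordiv_eq_ediv_of_pos (by omega)]
  rw [← h2, Int.mul_ediv_cancel_left _ (by omega)]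

-- ===== VERDICT (by name: the statement is the Claim_ definition above) =====
theorem solution_spec : Claim_equal_solution := by
  intro x y _ hpre
  unfold Spec_solution
  rw [solution_closed x y hpre.1 hpre.2, alt_closed x y hpre.1 hpre.2]
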